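-- pv_equiv track=rewrite | github.com/pypi-data/pypi-mirror-102 | packages/unithash/unithash-0.1.0.tar.gz/unithash-0.1.0/unithash/find.py | set_unithash
-- ===== SOURCE A (Python) =====
-- def get_unithash(n: int):
--     int(n)
--     if (n == 0):
--         return 0
--     elif (n % 9 == 0):
--         return 9
--     else:
--         return n % 9
--
-- def set_unithash(num: str, l: int):
--     sanitation=[]
--     sanitation[:0]=num
--     for i in range(0,len(sanitation)):
--         if (sanitation[i].isdigit())==False:
--             sanitation[i]=abs(ord(sanitation[i])-96)
--     num = ''.join([str(j) for j in sanitation])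
--     hash = [(num[i:i+int(l)]) for i in range(0, len(num), int(l))]
--     final_hash = []
--     for i in range(0,len(hash)):
--         final_hash.append(get_unithash(int(hash[i])))
--     fin_hash = ''.join([str(i) for i in final_hash])
--     return int(fin_hash)
-- ===== SOURCE B (Python) =====
-- def _digital_root(n):
--     while n >= 10:
--         s = 0
--         m = n
--         while m:
--             s += m % 10
--             m //= 10
--         n = s
--     return n
--
-- def set_unithash(num: str, l: int):
--     s = ''.join(c if c.isdigit() else str(abs(ord(c) - 96)) for c in num)
--     step = int(l)
--     out = []
--     i = 0
--     while i < len(s):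
--         out.append(_digital_root(int(s[i:i + step])))
--         i += step
--     return int(''.join(str(d) for d in out))
-- ===== Notes on version B (the rewrite author's own statement) =====
-- stated objective: idiomatic
-- what changed: B builds the sanitised digit string with a single join-over-comprehension instead of A's in-place index-loop mutation, fuses chunking and hashing into one pointer-advancing while loop instead of A's two passes (a range-comprehension chunk list, then an indexed append loop), and computes each digital root by iteratively summing decimal digits until one digit remains instead of A's closed-form n % 9 rule.
import Mathlib
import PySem

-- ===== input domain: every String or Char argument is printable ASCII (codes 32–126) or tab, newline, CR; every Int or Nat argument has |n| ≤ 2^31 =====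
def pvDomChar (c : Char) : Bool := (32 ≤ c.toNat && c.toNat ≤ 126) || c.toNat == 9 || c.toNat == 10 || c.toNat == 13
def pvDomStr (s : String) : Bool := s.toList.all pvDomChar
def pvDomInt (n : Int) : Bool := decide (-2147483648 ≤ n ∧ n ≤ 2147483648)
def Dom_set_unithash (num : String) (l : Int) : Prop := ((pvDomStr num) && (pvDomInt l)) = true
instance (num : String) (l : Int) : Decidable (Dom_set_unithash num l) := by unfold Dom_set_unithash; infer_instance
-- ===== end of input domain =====

-- B replaces A's in-place index loop + closed-form %9 digital root by a join-comprehension,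
-- a fused pointer-advancing chunk loop and an iterative digit-summation digital root (objective: idiomatic).

-- ===== PORT A =====
def get_unithash (n : Int) : Int :=
  if n = 0 then 0
  else if PySem.Int.mod n 9 = 0 then 9
  else PySem.Int.mod n 9

-- the Python list 'sanitation' holds chars or ints; modelled as Char ⊕ Int
def pvIsdigitS : Char ⊕ Int → Bool
  | .inl c => PySem.Str.isdigit c
  | .inr _ => false  -- int has no .isdigit (unreachable: each index is read before being overwritten)

def pvOrdS : Char ⊕ Int → Int
  | .inl c => (c.toNat : Int)
  | .inr _ => 0      -- ord(int) would be a TypeError (unreachable, as above)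

def pvStrOf : Char ⊕ Int → List Char
  | .inl c => [c]                  -- str(j) of a 1-char string
  | .inr m => PySem.Int.toChars m  -- str(j) of an int

def set_unithash (num : String) (l : Int) : Int :=
  let sanitation0 : List (Char ⊕ Int) := num.toList.map Sum.inl
  let sanitation : List (Char ⊕ Int) :=
    (PySem.List.pyRange 0 (PySem.List.len sanitation0) 1).foldl
      (fun s i =>
        if pvIsdigitS (PySem.List.pyGetD s i (.inl ' ')) = false then
          PySem.List.pySetD s i (.inr |pvOrdS (PySem.List.pyGetD s i (.inl ' ')) - 96|)
        else s)
      sanitation0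
  let num' : List Char := PySem.Chars.join [] (sanitation.map pvStrOf)
  let hash : List (List Char) :=
    (PySem.List.pyRange 0 (PySem.List.len num') l).map
      (fun i => PySem.List.slice num' (some i) (some (i + l)))
  let final_hash : List Int :=
    (PySem.List.pyRange 0 (PySem.List.len hash) 1).foldl
      (fun acc i =>
        acc ++ [get_unithash ((PySem.Int.ofChars? (PySem.List.pyGetD hash i [])).getD 0)])
      []
  let fin_hash : List Char := PySem.Chars.join [] (final_hash.map PySem.Int.toChars)
  (PySem.Int.ofChars? fin_hash).getD 0  -- int(fin_hash); '' (raises) excluded by Pre_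

-- ===== PORT B =====
-- inner 'while m: s += m % 10; m //= 10' of _digital_root
def pvDigitSumAux (m s : Nat) : Nat :=
  if m = 0 then s else pvDigitSumAux (m / 10) (s + m % 10)
termination_by m
decreasing_by exact Nat.div_lt_self (Nat.pos_of_ne_zero (by assumption)) (by omega)

theorem pvDigitSumAux_le (m : Nat) : ∀ s, pvDigitSumAux m s ≤ m + s := by
  induction m using Nat.strong_induction_on with
  | _ m ih =>
    intro s
    rw [pvDigitSumAux]
    split
    · omega
    · have h0 : m ≠ 0 := by assumption
      have := ih (m / 10) (Nat.div_lt_self (Nat.pos_of_ne_zero h0) (by omega)) (s + m % 10)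
      omega

theorem pvDigitSumAux_lt (m : Nat) (hm : 10 ≤ m) : pvDigitSumAux m 0 < m := by
  rw [pvDigitSumAux]
  split
  · omega
  · have := pvDigitSumAux_le (m / 10) (0 + m % 10)
    omega

-- outer 'while n >= 10' of _digital_root
def pvDigRoot (n : Int) : Int :=
  if 10 ≤ n then pvDigRoot ((pvDigitSumAux n.toNat 0 : Nat) : Int) else n
termination_by n.toNat
decreasing_by
  rename_i h
  simp only [Int.toNat_natCast]
  exact pvDigitSumAux_lt n.toNat (by omega)

-- 'while i < len(s): out.append(_digital_root(int(s[i:i+step]))); i += step'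
def pvChunkRoots (k : Nat) (hk : 0 < k) (s : List Char) (i : Nat) : List Int :=
  if i < s.length then
    pvDigRoot ((PySem.Int.ofChars?
        (PySem.List.slice s (some (i : Int)) (some ((i : Int) + (k : Int))))).getD 0)
      :: pvChunkRoots k hk s (i + k)
  else []
termination_by s.length - i
decreasing_by omega

def set_unithash_alt (num : String) (l : Int) : Int :=
  let s : List Char :=
    num.toList.flatMap
      (fun c => if PySem.Str.isdigit c then [c] else PySem.Int.toChars |(c.toNat : Int) - 96|)
  if hk : 0 < l.toNat then
    (PySem.Int.ofChars? (PySem.Chars.join [] ((pvChunkRoots l.toNat hk s 0).map PySem.Int.toChars))).getD 0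
  else 0  -- l ≤ 0: Python raises ValueError (excluded by Pre_)

-- ===== PRECONDITION & SPEC =====
-- Pre_ excludes exactly the inputs where Python A raises ValueError:
-- l ≤ 0 (range() step 0 / int('') on an empty chunk) and num = '' (int('') at the end).
def Pre_set_unithash (num : String) (l : Int) : Prop := 1 ≤ l ∧ num ≠ ""
instance (num : String) (l : Int) : Decidable (Pre_set_unithash num l) := by
  unfold Pre_set_unithash; infer_instance

def pvWitness_set_unithash : String × Int := ("ab3", 2)

def Spec_set_unithash (num : String) (l : Int) (out : Int) : Prop := out = set_unithash_alt num l
instance (num : String) (l : Int) (out : Int) : Decidable (Spec_set_unithash num l out) := by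
  unfold Spec_set_unithash; infer_instance

-- ===== CLAIM (what is proved, stated in full; the proofs are below) =====
def Claim_equal_set_unithash : Prop :=
  ∀ (num : String) (l : Int), Dom_set_unithash num l → Pre_set_unithash num l →
    Spec_set_unithash num l (set_unithash num l)

-- ===== LEMMAS AND PROOFS =====

theorem join_nil_flatten (xss : List (List Char)) : PySem.Chars.join [] xss = xss.flatten := by
  induction xss with
  | nil => simp [PySem.Chars.join_nil]
  | cons p rest ih =>
    cases rest with
    | nil => simp [PySem.Chars.join, List.intercalate]
    | cons q rest' =>
      rw [PySem.Chars.join_cons_cons, ih]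
      simp

-- the per-char sanitising function both programs implement
def pvSanChar (c : Char) : List Char :=
  if PySem.Str.isdigit c then [c] else PySem.Int.toChars |(c.toNat : Int) - 96|

theorem pyRange_pos_cons (a b s : Int) (hs : 0 < s) (hab : a < b) :
    PySem.List.pyRange a b s = a :: PySem.List.pyRange (a + s) b s := by
  rw [PySem.List.pyRange_of_pos _ _ hs, PySem.List.pyRange_of_pos _ _ hs]
  have hcnt : (0 : Int) < (b - a + s - 1) / s := by
    have h1 : (1 : Int) * s ≤ b - a + s - 1 := by omega
    exact lt_of_lt_of_le (by omega)
      ((Int.le_ediv_iff_mul_le (a := 1) (b := b - a + s - 1) hs).mpr h1)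
  rw [if_pos hab]
  obtain ⟨m, hm⟩ : ∃ m, ((b - a + s - 1) / s).toNat = m + 1 :=
    ⟨((b - a + s - 1) / s).toNat - 1, by omega⟩
  rw [hm, List.range_succ_eq_map, List.map_cons, List.map_map]
  congr 1
  · simp
  by_cases hab2 : a + s < b
  · rw [if_pos hab2]
    have hq : b - (a + s) + s - 1 = (b - a + s - 1) + (-1) * s := by ring
    have : (b - (a + s) + s - 1) / s = (b - a + s - 1) / s - 1 := by
      rw [hq, Int.add_mul_ediv_right _ _ (by omega : s ≠ 0)]
      ring
    rw [this]
    have hmn : (((b - a + s - 1) / s - 1)).toNat = m := by omega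
    rw [hmn]
    apply List.map_congr_left
    intro k _
    simp [Nat.succ_eq_add_one]
    ring
  · rw [if_neg hab2]
    have hub : b - a + s - 1 < 2 * s := by omega
    have : (b - a + s - 1) / s < 2 := by
      exact (Int.ediv_lt_iff_lt_mul (a := b - a + s - 1) (b := 2) hs).mpr (by omega)
    have hm0 : m = 0 := by omega
    simp [hm0]

theorem pyRange_pos_shift (n l : Int) (hl : 0 < l) :
    PySem.List.pyRange l n l = (PySem.List.pyRange 0 (n - l) l).map (· + l) := by
  rw [PySem.List.pyRange_of_pos _ _ hl, PySem.List.pyRange_of_pos _ _ hl, List.map_map]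
  have hiff : (l < n) ↔ ((0 : Int) < n - l) := by omega
  rw [if_congr hiff rfl rfl]
  have harg : n - l - 0 + l - 1 = n - l + l - 1 := by ring
  rw [harg]
  apply List.map_congr_left
  intro k _
  simp
  ring

-- A's in-place update loop is a map
theorem setD_loop_eq_map {α : Type} (upd : α → α) (d : α)
    (step : List α → Int → List α)
    (hstep : ∀ (s : List α) (nn : Nat),
      step s (nn : Int) = PySem.List.pySetD s (nn : Int) (upd (PySem.List.pyGetD s (nn : Int) d)))
    (pre suf : List α) :
    (PySem.List.pyRange (pre.length : Int) ((pre.length : Int) + (suf.length : Int)) 1).foldl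
      step (pre ++ suf) = pre ++ suf.map upd := by
  induction suf generalizing pre with
  | nil => simp
  | cons x t ih =>
    rw [pyRange_pos_cons _ _ _ (by omega) (by simp only [List.length_cons]; push_cast; omega),
      List.foldl_cons, hstep]
    have hget : PySem.List.pyGetD (pre ++ x :: t) (pre.length : Int) (d := d) = x := by
      rw [PySem.List.pyGetD_natCast]
      simp [List.getD]
    have hset : PySem.List.pySetD (pre ++ x :: t) (pre.length : Int) (upd x)
        = (pre ++ [upd x]) ++ t := by
      rw [PySem.List.pySetD_natCast, List.set_append_right _ _ (le_refl _)]
      simp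
    rw [hget, hset]
    have hrec := ih (pre ++ [upd x])
    have h2 : (((pre ++ [upd x]).length : Nat) : Int) = (pre.length : Int) + 1 := by
      simp
    rw [h2] at hrec
    have hb : (pre.length : Int) + ((x :: t).length : Int)
        = ((pre.length : Int) + 1) + (t.length : Int) := by
      simp only [List.length_cons]; push_cast; ring
    rw [hb, hrec]
    simp

-- proof-side mirror of the chunk decomposition
def pvChunkList (k : Nat) (hk : 0 < k) : List Char → List (List Char)
  | [] => []
  | c :: rest => (c :: rest).take k :: pvChunkList k hk ((c :: rest).drop k)
termination_by cs => cs.length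
decreasing_by simp; omega

theorem pyRange_pos_nil (a b s : Int) (hs : 0 < s) (hab : b ≤ a) :
    PySem.List.pyRange a b s = [] := by
  rw [PySem.List.pyRange_of_pos _ _ hs, if_neg (by omega)]
  simp

theorem chunks_eq_aux (l : Int) (hl : 1 ≤ l) : ∀ (N : Nat) (cs : List Char), cs.length ≤ N →
    (PySem.List.pyRange 0 ((cs.length : Int)) l).map
      (fun i => PySem.List.slice cs (some i) (some (i + l)))
    = pvChunkList l.toNat (by omega) cs := by
  intro N
  induction N with
  | zero =>
    intro cs hcs
    have hnil : cs = [] := by cases cs <;> simp_all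
    subst hnil
    simp [pvChunkList, pyRange_pos_nil 0 0 l (by omega) (by omega)]
  | succ N ih =>
    intro cs hcs
    cases cs with
    | nil => simp [pvChunkList, pyRange_pos_nil 0 0 l (by omega) (by omega)]
    | cons c rest =>
      rw [pvChunkList]
      rw [pyRange_pos_cons 0 _ l (by omega) (by simp only [List.length_cons]; push_cast; omega)]
      rw [List.map_cons]
      congr 1
      · show PySem.List.slice (c :: rest) (some 0) (some (0 + l)) = _
        rw [zero_add, PySem.List.slice_zero_start, PySem.List.slice_to _ (by omega)]
      · rw [zero_add, pyRange_pos_shift _ _ (by omega), List.map_map]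
        have hdlen : ((c :: rest).drop l.toNat).length ≤ N := by
          have h1 : ((c :: rest).drop l.toNat).length = (c :: rest).length - l.toNat := by
            simp
          have h2 : (c :: rest).length = rest.length + 1 := by simp
          omega
        rw [← ih _ hdlen]
        by_cases hle : l ≤ (((c :: rest).length : Nat) : Int)
        · have hlen2 : ((((c :: rest).drop l.toNat).length : Nat) : Int)
              = (((c :: rest).length : Nat) : Int) - l := by
            simp only [List.length_drop]; omega
          rw [hlen2]
          apply List.map_congr_left
          intro i hi
          have hi' := (PySem.List.mem_pyRange_iff_of_pos (by omega) i).mp hi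
          simp only [Function.comp_apply]
          rw [PySem.List.slice_toNat (c :: rest)
              (show (0:Int) ≤ i + l by omega) (show (0:Int) ≤ i + l + l by omega),
            PySem.List.slice_toNat ((c :: rest).drop l.toNat)
              (show (0:Int) ≤ i by omega) (show (0:Int) ≤ i + l by omega),
            List.drop_drop]
          have e1 : (i + l).toNat = i.toNat + l.toNat := by omega
          have e2 : (i + l + l).toNat - (i + l).toNat = (i + l).toNat - i.toNat := by omega
          rw [e2, e1]
          congr 2
          omega
        · have h1 : PySem.List.pyRange 0 ((((c :: rest).length : Nat) : Int) - l) l = [] :=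
            pyRange_pos_nil _ _ _ (by omega) (by omega)
          have h2 : ((((c :: rest).drop l.toNat).length : Nat) : Int) = 0 := by
            simp only [List.length_drop]; omega
          rw [h1, h2, pyRange_pos_nil 0 0 l (by omega) (by omega)]
          simp

theorem chunks_eq (l : Int) (hl : 1 ≤ l) (cs : List Char) :
    (PySem.List.pyRange 0 ((cs.length : Int)) l).map
      (fun i => PySem.List.slice cs (some i) (some (i + l)))
    = pvChunkList l.toNat (by omega) cs :=
  chunks_eq_aux l hl cs.length cs (le_refl _)

theorem chunkRoots_idx_eq (k : Nat) (hk : 0 < k) (s : List Char) :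
    ∀ (N i : Nat), s.length - i ≤ N →
    pvChunkRoots k hk s i
      = (pvChunkList k hk (s.drop i)).map
          (fun ch => pvDigRoot ((PySem.Int.ofChars? ch).getD 0)) := by
  intro N
  induction N with
  | zero =>
    intro i hi
    have hge : s.length ≤ i := by omega
    rw [pvChunkRoots, if_neg (by omega), List.drop_eq_nil_of_le hge, pvChunkList]
    simp
  | succ N ih =>
    intro i hi
    by_cases hlt : i < s.length
    · rw [pvChunkRoots, if_pos hlt]
      cases hd : s.drop i with
      | nil => exact absurd (by simpa using congrArg List.length hd) (by omega)
      | cons c t =>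
        rw [pvChunkList, List.map_cons]
        congr 1
        · rw [PySem.List.slice_natCast_add, hd]
        · rw [ih (i + k) (by omega)]
          congr 1
          rw [← hd, List.drop_drop, Nat.add_comm]
    · rw [pvChunkRoots, if_neg hlt, List.drop_eq_nil_of_le (by omega), pvChunkList]
      simp

theorem chunkRoots_eq_map (k : Nat) (hk : 0 < k) (cs : List Char) :
    pvChunkRoots k hk cs 0
      = (pvChunkList k hk cs).map (fun ch => pvDigRoot ((PySem.Int.ofChars? ch).getD 0)) := by
  rw [chunkRoots_idx_eq k hk cs cs.length 0 (by omega)]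
  simp

theorem toDigitsCore_digits (fuel : Nat) : ∀ (n : Nat) (acc : List Char),
    (∀ c ∈ acc, PySem.Str.isdigit c = true) →
    ∀ c ∈ Nat.toDigitsCore 10 fuel n acc, PySem.Str.isdigit c = true := by
  induction fuel with
  | zero => intro n acc hacc; simpa [Nat.toDigitsCore] using hacc
  | succ fuel ih =>
    intro n acc hacc
    have hdig : PySem.Str.isdigit (Nat.digitChar (n % 10)) = true := by
      have h10 : n % 10 < 10 := by omega
      set m := n % 10 with hm
      interval_cases m <;> decide
    rw [Nat.toDigitsCore]
    split
    · intro c hc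
      rcases List.mem_cons.mp hc with rfl | hc'
      · exact hdig
      · exact hacc c hc'
    · exact ih (n / 10) _ (by
        intro c hc
        rcases List.mem_cons.mp hc with rfl | hc'
        · exact hdig
        · exact hacc c hc')

theorem toChars_digits (n : Int) (hn : 0 ≤ n) :
    ∀ c ∈ PySem.Int.toChars n, PySem.Str.isdigit c = true := by
  rw [PySem.Int.toChars, if_neg (by omega)]
  rw [Nat.toDigits]
  exact toDigitsCore_digits _ _ [] (by simp)

theorem sanChar_digits (c : Char) : ∀ c' ∈ pvSanChar c, PySem.Str.isdigit c' = true := by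
  intro c' hc'
  unfold pvSanChar at hc'
  split at hc'
  · rcases List.mem_singleton.mp hc' with rfl
    assumption
  · exact toChars_digits _ (abs_nonneg _) c' hc'

theorem digit_not_space (c : Char) (h : PySem.Str.isdigit c = true) :
    PySem.Int.isIntSpace c = false := by
  simp [PySem.Str.isdigit, PySem.Chars.isdigit] at h
  simp [PySem.Int.isIntSpace]
  refine ⟨⟨⟨⟨⟨?_, ?_⟩, ?_⟩, ?_⟩, ?_⟩, ?_⟩ <;> rintro rfl <;> revert h <;> decide

theorem ofChars?_digits_nonneg (cs : List Char) (hd : ∀ c ∈ cs, PySem.Str.isdigit c = true)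
    (z : Int) (hz : PySem.Int.ofChars? cs = some z) : 0 ≤ z := by
  have h1 : List.dropWhile PySem.Int.isIntSpace cs = cs := by
    cases cs with
    | nil => simp
    | cons c t => simp [digit_not_space c (hd c (by simp))]
  have h2 : List.dropWhile PySem.Int.isIntSpace cs.reverse = cs.reverse := by
    cases hrev : cs.reverse with
    | nil => simp
    | cons c t =>
      have hc : c ∈ cs := by
        have : c ∈ cs.reverse := by rw [hrev]; simp
        simpa using this
      simp [digit_not_space c (hd c hc)]
  unfold PySem.Int.ofChars? at hz
  simp only [h1, h2, List.reverse_reverse] at hz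
  split at hz
  · rename_i ds heq
    exfalso
    have hmem := hd '-' (by simp)
    revert hmem; decide
  · rename_i ds heq
    simp only [Option.map_eq_some_iff] at hz
    obtain ⟨n, hn, hzn⟩ := hz
    simp only [bind, Option.bind] at hn
    split at hn
    · exact absurd hn (by simp)
    · rename_i a _
      have ha : (a : Int) = n := by simpa using hn
      have := Int.natCast_nonneg a
      omega
  · simp only [Option.map_eq_some_iff] at hz
    obtain ⟨n, hn, hzn⟩ := hz
    simp only [bind, Option.bind] at hn
    split at hn
    · exact absurd hn (by simp)
    · rename_i a _
      have ha : (a : Int) = n := by simpa using hn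
      have := Int.natCast_nonneg a
      omega

theorem digitSumAux_shift (m : Nat) : ∀ s, pvDigitSumAux m s = pvDigitSumAux m 0 + s := by
  induction m using Nat.strong_induction_on with
  | _ m ih =>
    intro s
    by_cases h0 : m = 0
    · subst h0
      conv_lhs => rw [pvDigitSumAux]
      conv_rhs => rw [pvDigitSumAux]
      simp
    · have hlt : m / 10 < m := Nat.div_lt_self (Nat.pos_of_ne_zero h0) (by omega)
      conv_lhs => rw [pvDigitSumAux]
      conv_rhs => rw [pvDigitSumAux]
      rw [if_neg h0, if_neg h0, ih (m / 10) hlt (s + m % 10), ih (m / 10) hlt (0 + m % 10)]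
      omega

theorem digitSum_mod9 (m : Nat) : pvDigitSumAux m 0 % 9 = m % 9 := by
  induction m using Nat.strong_induction_on with
  | _ m ih =>
    by_cases h0 : m = 0
    · subst h0; rw [pvDigitSumAux]; simp
    · have hlt : m / 10 < m := Nat.div_lt_self (Nat.pos_of_ne_zero h0) (by omega)
      rw [pvDigitSumAux, if_neg h0, digitSumAux_shift]
      have := ih (m / 10) hlt
      omega

theorem digitSum_pos (m : Nat) (hm : 0 < m) : 0 < pvDigitSumAux m 0 := by
  induction m using Nat.strong_induction_on with
  | _ m ih =>
    have h0 : m ≠ 0 := by omega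
    rw [pvDigitSumAux, if_neg h0, digitSumAux_shift]
    by_cases hm10 : m % 10 = 0
    · have : 0 < m / 10 := by omega
      have := ih (m / 10) (Nat.div_lt_self (Nat.pos_of_ne_zero h0) (by omega)) this
      omega
    · omega

theorem root_eq_aux : ∀ (N : Nat) (n : Int), n.toNat < N → 0 ≤ n →
    get_unithash n = pvDigRoot n := by
  intro N
  induction N with
  | zero => intro n h; omega
  | succ N ih =>
    intro n hN hn
    by_cases h10 : 10 ≤ n
    · rw [pvDigRoot, if_pos h10]
      set S : Nat := pvDigitSumAux n.toNat 0 with hS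
      have hSlt : S < n.toNat := pvDigitSumAux_lt n.toNat (by omega)
      have hSpos : 0 < S := digitSum_pos n.toNat (by omega)
      have hmod : PySem.Int.mod n 9 = PySem.Int.mod (S : Int) 9 := by
        rw [PySem.Int.mod_eq_emod_of_pos (by omega), PySem.Int.mod_eq_emod_of_pos (by omega)]
        have h := digitSum_mod9 n.toNat
        omega
      have hstep : get_unithash n = get_unithash (S : Int) := by
        unfold get_unithash
        rw [if_neg (show ¬ n = 0 by omega), if_neg (show ¬ ((S : Nat) : Int) = 0 by omega), hmod]
      rw [hstep]
      exact ih (S : Int) (by omega) (by omega)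
    · rw [pvDigRoot, if_neg h10]
      have h9 : PySem.Int.mod n 9 = n % 9 := PySem.Int.mod_eq_emod_of_pos (by omega)
      unfold get_unithash
      rw [h9]
      interval_cases n <;> decide

theorem root_eq (n : Int) (hn : 0 ≤ n) : get_unithash n = pvDigRoot n :=
  root_eq_aux (n.toNat + 1) n (by omega) hn

theorem set_getD_self {α : Type} (xs : List α) : ∀ (n : Nat) (d : α),
    xs.set n (xs.getD n d) = xs := by
  induction xs with
  | nil => intro n d; simp
  | cons x t ih =>
    intro n d
    cases n with
    | zero => simp
    | succ n => simpa [List.getD_eq_getElem?_getD] using ih n d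

theorem setD_loop_eq_map0 {α : Type} (upd : α → α) (d : α)
    (step : List α → Int → List α)
    (hstep : ∀ (s : List α) (nn : Nat),
      step s (nn : Int) = PySem.List.pySetD s (nn : Int) (upd (PySem.List.pyGetD s (nn : Int) d)))
    (xs : List α) :
    (PySem.List.pyRange 0 (xs.length : Int) 1).foldl step xs = xs.map upd := by
  have := setD_loop_eq_map upd d step hstep [] xs
  simpa using this

theorem set_unithash_spec' (num : String) (l : Int) (h : Pre_set_unithash num l) :
    set_unithash num l = set_unithash_alt num l := by
  obtain ⟨hl, -⟩ := h
  have hk : 0 < l.toNat := by omega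
  simp only [set_unithash, set_unithash_alt, PySem.List.len_eq]
  rw [dif_pos hk]
  set upd : Char ⊕ Int → Char ⊕ Int :=
    fun x => if pvIsdigitS x = false then Sum.inr |pvOrdS x - 96| else x with hupd
  have hstep : ∀ (s : List (Char ⊕ Int)) (nn : Nat),
      (if pvIsdigitS (PySem.List.pyGetD s (nn : Int) (.inl ' ')) = false then
        PySem.List.pySetD s (nn : Int)
          (.inr |pvOrdS (PySem.List.pyGetD s (nn : Int) (.inl ' ')) - 96|)
      else s)
      = PySem.List.pySetD s (nn : Int) (upd (PySem.List.pyGetD s (nn : Int) (.inl ' '))) := by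
    intro s nn
    rw [hupd]
    by_cases hb : pvIsdigitS (PySem.List.pyGetD s (nn : Int) (.inl ' ')) = false
    · rw [if_pos hb]
      beta_reduce
      rw [if_pos hb]
    · rw [if_neg hb]
      beta_reduce
      rw [if_neg hb, PySem.List.pySetD_natCast, PySem.List.pyGetD_natCast, set_getD_self]
  have hcomp : ((pvStrOf ∘ upd) ∘ Sum.inl)
      = (fun c => if PySem.Str.isdigit c then [c]
          else PySem.Int.toChars |(c.toNat : Int) - 96|) := by
    funext c
    simp only [Function.comp_apply, hupd]
    by_cases hc : PySem.Str.isdigit c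
    · simp [pvIsdigitS, hc, pvStrOf]
    · simp [pvIsdigitS, hc, pvStrOf, pvOrdS]
  have hsanA : PySem.Chars.join []
      (((PySem.List.pyRange 0 ((num.toList.map (Sum.inl : Char → Char ⊕ Int)).length : Int) 1).foldl
        (fun (s : List (Char ⊕ Int)) (i : Int) =>
          if pvIsdigitS (PySem.List.pyGetD s i (.inl ' ')) = false then
            PySem.List.pySetD s i (.inr |pvOrdS (PySem.List.pyGetD s i (.inl ' ')) - 96|)
          else s)
        (num.toList.map (Sum.inl : Char → Char ⊕ Int))).map pvStrOf)
      = num.toList.flatMap (fun c => if PySem.Str.isdigit c then [c]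
          else PySem.Int.toChars |(c.toNat : Int) - 96|) := by
    rw [setD_loop_eq_map0 upd (Sum.inl ' ') _ hstep, join_nil_flatten,
      List.map_map, List.map_map, hcomp, ← List.flatMap_def]
  rw [hsanA]
  set san : List Char := num.toList.flatMap
    (fun c => if PySem.Str.isdigit c then [c]
      else PySem.Int.toChars |(c.toNat : Int) - 96|) with hsan
  have hsandig : ∀ c ∈ san, PySem.Str.isdigit c = true := by
    intro c hc
    rw [hsan] at hc
    obtain ⟨c0, -, hc0⟩ := List.mem_flatMap.mp hc
    exact sanChar_digits c0 c hc0
  have hfold : ∀ (hash : List (List Char)),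
      (PySem.List.pyRange 0 (hash.length : Int) 1).foldl
        (fun acc i =>
          acc ++ [get_unithash ((PySem.Int.ofChars? (PySem.List.pyGetD hash i [])).getD 0)]) []
      = hash.map (fun ch => get_unithash ((PySem.Int.ofChars? ch).getD 0)) := by
    intro hash
    rw [PySem.List.foldl_append_singleton_eq_map, List.nil_append]
    rw [show (fun i => get_unithash ((PySem.Int.ofChars? (PySem.List.pyGetD hash i [])).getD 0))
        = (fun ch => get_unithash ((PySem.Int.ofChars? ch).getD 0)) ∘
          (fun i => PySem.List.pyGetD hash i []) from rfl]
    rw [← List.map_map, PySem.List.map_pyGetD_pyRange_zero']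
  rw [hfold]
  have hroots : ((PySem.List.pyRange 0 ((san.length : Nat) : Int) l).map
        (fun i => PySem.List.slice san (some i) (some (i + l)))).map
        (fun ch => get_unithash ((PySem.Int.ofChars? ch).getD 0))
      = pvChunkRoots l.toNat hk san 0 := by
    have hcongr : ∀ ch ∈ (PySem.List.pyRange 0 ((san.length : Nat) : Int) l).map
        (fun i => PySem.List.slice san (some i) (some (i + l))),
        get_unithash ((PySem.Int.ofChars? ch).getD 0)
          = pvDigRoot ((PySem.Int.ofChars? ch).getD 0) := by
      intro ch hch
      obtain ⟨i, -, rfl⟩ := List.mem_map.mp hch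
      have hdig : ∀ c ∈ PySem.List.slice san (some i) (some (i + l)),
          PySem.Str.isdigit c = true := by
        intro c hc
        exact hsandig c (PySem.List.mem_of_mem_slice _ _ _ hc)
      cases hof : PySem.Int.ofChars? (PySem.List.slice san (some i) (some (i + l))) with
      | none => simp only [Option.getD_none]; exact root_eq 0 (le_refl 0)
      | some z =>
        simp only [Option.getD_some]
        exact root_eq z (ofChars?_digits_nonneg _ hdig z hof)
    rw [List.map_congr_left hcongr, chunks_eq l hl san,
      ← chunkRoots_eq_map l.toNat hk san]
  rw [hroots]

-- ===== VERDICT (by name: the statement is the Claim_ definition above) =====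
theorem set_unithash_spec : Claim_equal_set_unithash := by
  intro num l _ hpre
  unfold Spec_set_unithash
  exact set_unithash_spec' num l hpre
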